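-- pv_equiv track=rewrite | github.com/FellowTraveler/Clean-Coder-AI | src/utilities/syntax_checker_functions.py | bracket_balance
-- ===== SOURCE A (Python) =====
-- def bracket_balance(code, beginnig_bracket='{', end_bracket='}'):
--     opened_brackets_count = 0
--
--     for char in code:
--         if char == beginnig_bracket:
--             opened_brackets_count += 1
--         elif char == end_bracket:
--             opened_brackets_count -= 1
--             if opened_brackets_count < 0:
--                 return f"Invalid syntax, mismatch of {beginnig_bracket} and {end_bracket}"
--
--     if opened_brackets_count == 0:
--         return "Valid syntax"
--     else:
--         return f"Invalid syntax, mismatch of {beginnig_bracket} and {end_bracket}"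
-- ===== SOURCE B (Python) =====
-- def bracket_balance(code, beginnig_bracket='{', end_bracket='}'):
--     # Divide and conquer: code[lo:hi] reduces to a pair
--     # (unmatched closing brackets, unmatched opening brackets);
--     # halves combine by cancelling min(openers_left, closers_right) pairs.
--     def reduce(lo, hi):
--         if hi - lo <= 1:
--             if lo < hi:
--                 ch = code[lo]
--                 if ch == beginnig_bracket:
--                     return (0, 1)
--                 elif ch == end_bracket:
--                     return (1, 0)
--             return (0, 0)
--         mid = (lo + hi) // 2
--         c1, o1 = reduce(lo, mid)
--         c2, o2 = reduce(mid, hi)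
--         m = min(o1, c2)
--         return (c1 + c2 - m, o1 + o2 - m)
--
--     c, o = reduce(0, len(code))
--     if c or o:
--         return f"Invalid syntax, mismatch of {beginnig_bracket} and {end_bracket}"
--     return "Valid syntax"
-- ===== Notes on version B (the rewrite author's own statement) =====
-- stated objective: alternative
-- what changed: Replaces A's left-to-right counter scan with early return by a divide-and-conquer reduction: each half of the string reduces to a pair (unmatched closers, unmatched openers), halves combine by cancelling min(openers_left, closers_right) pairs, and the string is valid iff the whole reduces to (0, 0).
import Mathlib
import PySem

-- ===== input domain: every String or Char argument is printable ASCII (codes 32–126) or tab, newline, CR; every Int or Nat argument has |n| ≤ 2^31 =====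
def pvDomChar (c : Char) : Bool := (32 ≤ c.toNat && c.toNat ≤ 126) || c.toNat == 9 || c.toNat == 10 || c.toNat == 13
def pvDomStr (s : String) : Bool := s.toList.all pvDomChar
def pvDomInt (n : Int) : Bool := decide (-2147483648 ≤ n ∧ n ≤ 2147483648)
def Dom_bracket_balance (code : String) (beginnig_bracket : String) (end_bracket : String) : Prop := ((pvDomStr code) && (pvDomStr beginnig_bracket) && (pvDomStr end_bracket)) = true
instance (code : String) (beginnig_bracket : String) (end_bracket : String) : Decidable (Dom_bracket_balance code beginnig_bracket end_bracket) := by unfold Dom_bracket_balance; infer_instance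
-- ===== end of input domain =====

-- B replaces A's left-to-right counter with early return by a divide-and-conquer
-- reduction: each half reduces to (unmatched closers, unmatched openers), halves are
-- combined by pair cancellation; alternative algorithm, same O(n) cost, return values
-- proved identical on Dom.

def pvMsg (b e : String) : String := "Invalid syntax, mismatch of " ++ b ++ " and " ++ e

-- ===== PORT A =====
-- the for-loop of A, state = opened_brackets_count; branches in A's order
def bbLoopA (b e : String) : List Char → Int → String
  | [], n => if n = 0 then "Valid syntax" else pvMsg b e
  | c :: cs, n =>
    if String.mk [c] = b then bbLoopA b e cs (n + 1)
    else if String.mk [c] = e then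
      if n - 1 < 0 then pvMsg b e else bbLoopA b e cs (n - 1)
    else bbLoopA b e cs n

def bracket_balance (code : String) (beginnig_bracket : String) (end_bracket : String) : String :=
  bbLoopA beginnig_bracket end_bracket code.toList 0

-- ===== PORT B =====
-- reduce(lo, hi) of Source B: the slice code[lo:hi] is carried as a sublist; length 0/1 are
-- the base cases, longer segments split at the midpoint and the halves' pairs combine
def bbReduce (b e : String) : List Char → Int × Int
  | [] => (0, 0)
  | [c] =>
    if String.mk [c] = b then (0, 1)
    else if String.mk [c] = e then (1, 0)
    else (0, 0)
  | c₁ :: c₂ :: t =>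
    let k := (c₁ :: c₂ :: t).length / 2
    let r1 := bbReduce b e ((c₁ :: c₂ :: t).take k)
    let r2 := bbReduce b e ((c₁ :: c₂ :: t).drop k)
    let m := min r1.2 r2.1
    (r1.1 + r2.1 - m, r1.2 + r2.2 - m)
  termination_by l => l.length
  decreasing_by
  · simp [List.length_take]; omega
  · simp [List.length_drop]; omega

def bracket_balance_alt (code : String) (beginnig_bracket : String) (end_bracket : String) : String :=
  let r := bbReduce beginnig_bracket end_bracket code.toList
  if r.1 ≠ 0 ∨ r.2 ≠ 0 then pvMsg beginnig_bracket end_bracket else "Valid syntax"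

-- ===== PRECONDITION & SPEC =====
def Spec_bracket_balance (code : String) (beginnig_bracket : String) (end_bracket : String) (out : String) : Prop := out = bracket_balance_alt code beginnig_bracket end_bracket
instance (code : String) (beginnig_bracket : String) (end_bracket : String) (out : String) : Decidable (Spec_bracket_balance code beginnig_bracket end_bracket out) := by unfold Spec_bracket_balance; infer_instance

-- ===== CLAIM (what is proved, stated in full; the proofs are below) =====
def Claim_equal_bracket_balance : Prop := ∀ (code : String) (beginnig_bracket : String) (end_bracket : String), Dom_bracket_balance code beginnig_bracket end_bracket → Spec_bracket_balance code beginnig_bracket end_bracket (bracket_balance code beginnig_bracket end_bracket)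

-- ===== LEMMAS AND PROOFS =====

-- sequential specification: step one char on the pair (unmatched closers, unmatched openers)
def bbStep (b e : String) (st : Int × Int) (c : Char) : Int × Int :=
  if String.mk [c] = b then (st.1, st.2 + 1)
  else if String.mk [c] = e then
    (if st.2 > 0 then (st.1, st.2 - 1) else (st.1 + 1, st.2))
  else st

def bbRed (b e : String) (l : List Char) : Int × Int := l.foldl (bbStep b e) (0, 0)

def bbComb (x y : Int × Int) : Int × Int :=
  (x.1 + y.1 - min x.2 y.1, x.2 + y.2 - min x.2 y.1)

theorem bbStep_comb (b e : String) (st : Int × Int) (h : 0 ≤ st.2) (c : Char) :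
    bbStep b e st c = bbComb st (bbStep b e (0, 0) c) := by
  obtain ⟨x, y⟩ := st
  unfold bbStep bbComb
  split_ifs <;> simp_all <;> omega

theorem bbRed_snd_nonneg (b e : String) (l : List Char) :
    ∀ st : Int × Int, 0 ≤ st.2 → 0 ≤ (l.foldl (bbStep b e) st).2 := by
  induction l with
  | nil => intro st h; simpa using h
  | cons c t ih =>
    intro st h
    simp only [List.foldl_cons]
    apply ih
    obtain ⟨x, y⟩ := st
    unfold bbStep; split_ifs <;> simp_all <;> omega

theorem bbRed_fst_ge (b e : String) (l : List Char) :
    ∀ st : Int × Int, st.1 ≤ (l.foldl (bbStep b e) st).1 := by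
  induction l with
  | nil => intro st; simp
  | cons c t ih =>
    intro st
    simp only [List.foldl_cons]
    refine le_trans ?_ (ih _)
    obtain ⟨x, y⟩ := st
    unfold bbStep; split_ifs <;> simp <;> omega

theorem bbRed_nonneg (b e : String) (l : List Char) :
    0 ≤ (bbRed b e l).1 ∧ 0 ≤ (bbRed b e l).2 :=
  ⟨by simpa using bbRed_fst_ge b e l (0, 0), bbRed_snd_nonneg b e l (0, 0) le_rfl⟩

theorem bbComb_assoc (x y z : Int × Int) (hy : 0 ≤ y.1) (hz : 0 ≤ z.1) :
    bbComb (bbComb x y) z = bbComb x (bbComb y z) := by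
  obtain ⟨a, b⟩ := x; obtain ⟨c, d⟩ := y; obtain ⟨p, q⟩ := z
  unfold bbComb
  simp only [Prod.mk.injEq] at *
  constructor <;> omega

theorem foldl_comb (b e : String) (l : List Char) :
    ∀ st : Int × Int, 0 ≤ st.2 →
      l.foldl (bbStep b e) st = bbComb st (bbRed b e l) := by
  induction l with
  | nil =>
    intro st h
    obtain ⟨x, y⟩ := st
    simp only [List.foldl_nil, bbRed, bbComb, Prod.mk.injEq]
    simp at h
    constructor <;> omega
  | cons c t ih =>
    intro st h
    have hu1 : 0 ≤ (bbStep b e (0, 0) c).1 := by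
      unfold bbStep; split_ifs <;> simp <;> omega
    have hu2 : 0 ≤ (bbStep b e (0, 0) c).2 := by
      unfold bbStep; split_ifs <;> simp <;> omega
    have hst2 : 0 ≤ (bbStep b e st c).2 := by
      obtain ⟨x, y⟩ := st
      unfold bbStep; split_ifs <;> simp_all <;> omega
    have hr := bbRed_nonneg b e t
    calc (c :: t).foldl (bbStep b e) st
        = t.foldl (bbStep b e) (bbStep b e st c) := by simp
      _ = bbComb (bbStep b e st c) (bbRed b e t) := ih _ hst2
      _ = bbComb (bbComb st (bbStep b e (0, 0) c)) (bbRed b e t) := by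
            rw [bbStep_comb b e st h c]
      _ = bbComb st (bbComb (bbStep b e (0, 0) c) (bbRed b e t)) :=
            bbComb_assoc _ _ _ hu1 hr.1
      _ = bbComb st (bbRed b e (c :: t)) := by
            congr 1
            have := ih (bbStep b e (0, 0) c) hu2
            simp only [bbRed, List.foldl_cons] at *
            rw [this]

-- bbRed is a homomorphism for concatenation
theorem bbRed_append (b e : String) (u v : List Char) :
    bbRed b e (u ++ v) = bbComb (bbRed b e u) (bbRed b e v) := by
  have h := foldl_comb b e v (bbRed b e u) (bbRed_nonneg b e u).2
  simpa [bbRed, List.foldl_append] using h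

-- B's divide-and-conquer reduce computes the sequential reduction
theorem bbReduce_eq_red (b e : String) (l : List Char) :
    bbReduce b e l = bbRed b e l := by
  induction hn : l.length using Nat.strong_induction_on generalizing l with
  | _ n ih =>
    match l with
    | [] => simp [bbReduce, bbRed]
    | [c] =>
      simp only [bbReduce, bbRed, List.foldl, bbStep]
      split_ifs <;> first | rfl | omega | simp_all
    | c₁ :: c₂ :: t =>
      rw [bbReduce]
      have hlen : (c₁ :: c₂ :: t).length = n := hn
      have hk : (c₁ :: c₂ :: t).length / 2 < n ∧
          (c₁ :: c₂ :: t).length - (c₁ :: c₂ :: t).length / 2 < n := by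
        simp at hlen ⊢; omega
      rw [ih _ (by rw [List.length_take]; omega) _ rfl,
          ih _ (by rw [List.length_drop]; omega) _ rfl]
      have := bbRed_append b e ((c₁ :: c₂ :: t).take ((c₁ :: c₂ :: t).length / 2))
          ((c₁ :: c₂ :: t).drop ((c₁ :: c₂ :: t).length / 2))
      rw [List.take_append_drop] at this
      rw [this]; rfl

-- A's loop decided by the sequential reduction started at (0, n)
theorem bbLoopA_eq (b e : String) (l : List Char) :
    ∀ n : Int, 0 ≤ n →
      bbLoopA b e l n =
        if l.foldl (bbStep b e) (0, n) = (0, 0) then "Valid syntax" else pvMsg b e := by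
  induction l with
  | nil =>
    intro n hn
    simp only [bbLoopA, List.foldl]
    by_cases h0 : n = 0
    · subst h0; simp
    · rw [if_neg h0, if_neg (by simp [Prod.ext_iff]; omega)]
  | cons c t ih =>
    intro n hn
    by_cases hb : String.mk [c] = b
    · simp only [bbLoopA, if_pos hb, List.foldl_cons, bbStep, hb, if_pos rfl]
      exact ih (n + 1) (by omega)
    · by_cases he : String.mk [c] = e
      · simp only [bbLoopA, if_neg hb, if_pos he, List.foldl_cons, bbStep, if_neg hb,
          if_pos he]
        by_cases hz : n - 1 < 0
        · have hn0 : n = 0 := by omega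
          rw [if_pos hz]
          have hge := bbRed_fst_ge b e t ((0 : Int) + 1, (0 : Int))
          have : (if (0 : Int) > 0 then ((0 : Int), (0 : Int) - 1)
              else ((0 : Int) + 1, (0 : Int))) = ((1 : Int), (0 : Int)) := by norm_num
          subst hn0
          rw [this]
          have hne : t.foldl (bbStep b e) (1, 0) ≠ (0, 0) := by
            intro hcontra
            have := bbRed_fst_ge b e t ((1 : Int), (0 : Int))
            rw [hcontra] at this; simp at this
          rw [if_neg hne]
        · rw [if_neg hz]
          have hpos : n > 0 := by omega
          rw [if_pos hpos]
          exact ih (n - 1) (by omega)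
      · simp only [bbLoopA, if_neg hb, if_neg he, List.foldl_cons, bbStep, if_neg hb,
          if_neg he]
        exact ih n hn

-- ===== VERDICT (by name: the statement is the Claim_ definition above) =====
theorem bracket_balance_spec : Claim_equal_bracket_balance := by
  intro code b e _
  unfold Spec_bracket_balance bracket_balance bracket_balance_alt
  rw [bbLoopA_eq b e code.toList 0 le_rfl, bbReduce_eq_red]
  have hr := bbRed_nonneg b e code.toList
  by_cases h : code.toList.foldl (bbStep b e) (0, 0) = (0, 0)
  · rw [if_pos h]
    have : ¬((bbRed b e code.toList).1 ≠ 0 ∨ (bbRed b e code.toList).2 ≠ 0) := by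
      simp [bbRed, h]
    rw [if_neg this]
  · rw [if_neg h]
    have : (bbRed b e code.toList).1 ≠ 0 ∨ (bbRed b e code.toList).2 ≠ 0 := by
      by_contra hc
      simp only [not_or, Decidable.not_not] at hc
      exact h (by simpa [bbRed, Prod.ext_iff] using hc)
    rw [if_pos this]
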